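-- pv_equiv track=rewrite | github.com/TheLostWeak/openevolve | examples/cap_set_example/utils_capset.py | _neg_sum_int
-- ===== SOURCE A (Python) =====
-- def _neg_sum_int(a_int: int, b_int: int, n: int) -> int:
--     """
--     Compute c_int such that a + b + c = 0 (mod 3) in encoded form.
--     This is c = -a - b (mod 3) done digitwise in base 3.
--     """
--     res = 0
--     mul = 1
--     for _ in range(n):
--         a_digit = a_int % 3
--         b_digit = b_int % 3
--         c_digit = (-(a_digit + b_digit)) % 3
--         res += c_digit * mul
--         a_int //= 3
--         b_int //= 3
--         mul *= 3
--     return res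
-- ===== SOURCE B (Python) =====
-- def _neg_sum_int(a_int: int, b_int: int, n: int) -> int:
--     # Phase 1: extract exactly n base-3 digits of each input (LSB first).
--     da = []
--     db = []
--     for _ in range(n):
--         da.append(a_int % 3)
--         a_int //= 3
--         db.append(b_int % 3)
--         b_int //= 3
--     # Phase 2: Horner reconstruction from the most-significant digit pair.
--     res = 0
--     for ad, bd in reversed(list(zip(da, db))):
--         res = res * 3 + (-(ad + bd)) % 3
--     return res
-- ===== Notes on version B (the rewrite author's own statement) =====
-- stated objective: faster
-- what changed: Replaces the single loop carrying a power-of-3 multiplier by a two-phase computation: first extract the n base-3 digit pairs into lists, then rebuild the result high-to-low with Horner's rule (res = res*3 + digit), eliminating the mul accumulator.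
import Mathlib
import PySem

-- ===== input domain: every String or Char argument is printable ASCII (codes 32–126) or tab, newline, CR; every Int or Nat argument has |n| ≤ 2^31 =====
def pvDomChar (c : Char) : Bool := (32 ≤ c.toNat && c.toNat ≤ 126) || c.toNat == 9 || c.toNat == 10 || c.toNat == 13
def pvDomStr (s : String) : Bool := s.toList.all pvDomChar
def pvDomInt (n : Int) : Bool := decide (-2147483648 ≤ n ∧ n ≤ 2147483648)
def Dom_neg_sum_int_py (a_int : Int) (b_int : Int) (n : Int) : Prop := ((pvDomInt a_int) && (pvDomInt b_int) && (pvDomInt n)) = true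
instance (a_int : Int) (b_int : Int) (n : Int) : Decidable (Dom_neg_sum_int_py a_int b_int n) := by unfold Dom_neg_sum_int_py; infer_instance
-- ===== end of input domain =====

-- B replaces A's single loop with a running power-of-3 multiplier by digit-list
-- extraction followed by a most-significant-first Horner fold (alternative decomposition).

-- ===== PORT A =====
-- the loop body of A: state (res, mul, a_int, b_int), one iteration per fuel unit
def negSumLoopA : Nat → Int → Int → Int → Int → Int
  | 0, res, _, _, _ => res
  | k + 1, res, mul, a, b =>
    negSumLoopA k
      (res + (PySem.Int.mod (-(PySem.Int.mod a 3 + PySem.Int.mod b 3)) 3) * mul)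
      (mul * 3) (PySem.Int.floordiv a 3) (PySem.Int.floordiv b 3)

def neg_sum_int_py (a_int : Int) (b_int : Int) (n : Int) : Int :=
  negSumLoopA n.toNat 0 1 a_int b_int

-- ===== PORT B =====
-- phase 1 of B: the list of exactly k base-3 digits, least significant first
def base3Digits : Nat → Int → List Int
  | 0, _ => []
  | k + 1, x => PySem.Int.mod x 3 :: base3Digits k (PySem.Int.floordiv x 3)

def neg_sum_int_py_alt (a_int : Int) (b_int : Int) (n : Int) : Int :=
  let da := base3Digits n.toNat a_int
  let db := base3Digits n.toNat b_int
  ((List.zip da db).reverse).foldl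
    (fun res p => res * 3 + PySem.Int.mod (-(p.1 + p.2)) 3) 0

-- ===== PRECONDITION & SPEC =====
def Spec_neg_sum_int_py (a_int : Int) (b_int : Int) (n : Int) (out : Int) : Prop := out = neg_sum_int_py_alt a_int b_int n
instance (a_int : Int) (b_int : Int) (n : Int) (out : Int) : Decidable (Spec_neg_sum_int_py a_int b_int n out) := by unfold Spec_neg_sum_int_py; infer_instance

-- ===== CLAIM (what is proved, stated in full; the proofs are below) =====
def Claim_equal_neg_sum_int_py : Prop := ∀ (a_int : Int) (b_int : Int) (n : Int), Dom_neg_sum_int_py a_int b_int n → Spec_neg_sum_int_py a_int b_int n (neg_sum_int_py a_int b_int n)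

-- ===== LEMMAS AND PROOFS =====

-- B's value with fuel k, as a function of the raw inputs
def hornerB (k : Nat) (a b : Int) : Int :=
  ((List.zip (base3Digits k a) (base3Digits k b)).reverse).foldl
    (fun res p => res * 3 + PySem.Int.mod (-(p.1 + p.2)) 3) 0

lemma hornerB_succ (k : Nat) (a b : Int) :
    hornerB (k + 1) a b =
      hornerB k (PySem.Int.floordiv a 3) (PySem.Int.floordiv b 3) * 3 +
        PySem.Int.mod (-(PySem.Int.mod a 3 + PySem.Int.mod b 3)) 3 := by
  simp [hornerB, base3Digits, List.zip, List.foldl_append]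

lemma loopA_eq_horner (k : Nat) :
    ∀ (res mul a b : Int), negSumLoopA k res mul a b = res + mul * hornerB k a b := by
  induction k with
  | zero => intro res mul a b; simp [negSumLoopA, hornerB, base3Digits]
  | succ k ih =>
    intro res mul a b
    rw [negSumLoopA, ih, hornerB_succ]
    ring

-- ===== VERDICT (by name: the statement is the Claim_ definition above) =====
theorem neg_sum_int_py_spec : Claim_equal_neg_sum_int_py := by
  intro a b n _
  show neg_sum_int_py a b n = neg_sum_int_py_alt a b n
  have : neg_sum_int_py_alt a b n = hornerB n.toNat a b := rfl
  rw [this, neg_sum_int_py, loopA_eq_horner]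
  ring
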